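-- pv_equiv track=rewrite | github.com/MayurNandanwar/DSS | Python/patterns_code.py | num_des_asc
-- ===== SOURCE A (Python) =====
-- def num_des_asc(n):
--     lst = []
--     for i in range(n,0,-1):
--         x = ''
--         for i in range(1,i+1):
--             x+=str(i)
--         lst.append(x)
--
--     for i in range(1,n+1):
--         x = ''
--         for i in range(1,i+1):
--             x+=str(i)
--         lst.append(x)
--     return '\n'.join(lst)
-- ===== SOURCE B (Python) =====
-- def num_des_asc(n):
--     prefixes = []
--     s = ''
--     for i in range(1, n + 1):
--         s += str(i)
--         prefixes.append(s)
--     return '\n'.join(list(reversed(prefixes)) + prefixes)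
-- ===== Notes on version B (the rewrite author's own statement) =====
-- stated objective: faster
-- what changed: One incremental pass builds each prefix string from the previous one and stores it, then the result is the reversed list concatenated with the list itself, replacing A's two symmetric loops that each recompute every prefix digit-by-digit with a nested inner loop.
import Mathlib
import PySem

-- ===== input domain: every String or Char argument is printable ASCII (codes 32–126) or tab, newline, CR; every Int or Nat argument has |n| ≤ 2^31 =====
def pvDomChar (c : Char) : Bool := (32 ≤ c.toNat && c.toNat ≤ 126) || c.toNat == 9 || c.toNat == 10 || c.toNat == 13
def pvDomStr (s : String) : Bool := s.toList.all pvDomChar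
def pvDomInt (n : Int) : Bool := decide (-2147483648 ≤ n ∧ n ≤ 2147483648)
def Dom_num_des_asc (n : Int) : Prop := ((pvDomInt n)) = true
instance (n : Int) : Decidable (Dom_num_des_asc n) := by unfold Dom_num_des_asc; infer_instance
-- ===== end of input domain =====

-- B replaces A's two symmetric nested-recompute loops by one incremental prefix build plus mirror (simpler).

-- ===== PORT A =====
def num_des_asc (n : Int) : String :=
  let lst : List String := (PySem.List.pyRange n 0 (-1)).foldl (fun lst i =>
    let x := (PySem.List.pyRange 1 (i+1) 1).foldl (fun x j => x ++ PySem.Int.toStr j) ""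
    lst ++ [x]) []
  let lst := (PySem.List.pyRange 1 (n+1) 1).foldl (fun lst i =>
    let x := (PySem.List.pyRange 1 (i+1) 1).foldl (fun x j => x ++ PySem.Int.toStr j) ""
    lst ++ [x]) lst
  PySem.Str.join "\n" lst

-- ===== PORT B =====
def num_des_asc_alt (n : Int) : String :=
  let st := (PySem.List.pyRange 1 (n+1) 1).foldl
    (fun (acc : List String × String) i =>
      let s := acc.2 ++ PySem.Int.toStr i
      (acc.1 ++ [s], s)) ([], "")
  PySem.Str.join "\n" (st.1.reverse ++ st.1)

-- ===== PRECONDITION & SPEC =====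
def Spec_num_des_asc (n : Int) (out : String) : Prop := out = num_des_asc_alt n
instance (n : Int) (out : String) : Decidable (Spec_num_des_asc n out) := by unfold Spec_num_des_asc; infer_instance

-- ===== CLAIM (what is proved, stated in full; the proofs are below) =====
def Claim_equal_num_des_asc : Prop := ∀ (n : Int), Dom_num_des_asc n → Spec_num_des_asc n (num_des_asc n)

-- ===== LEMMAS AND PROOFS =====

-- A's inner loop: the prefix string "12…i"
def pvPref (i : Int) : String :=
  (PySem.List.pyRange 1 (i+1) 1).foldl (fun x j => x ++ PySem.Int.toStr j) ""

-- A's outer loops are maps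
theorem pvFoldApp {α β : Type} (f : α → β) :
    ∀ (l : List α) (acc : List β),
      l.foldl (fun lst i => lst ++ [f i]) acc = acc ++ l.map f := by
  intro l
  induction l with
  | nil => simp
  | cons a t ih => intro acc; simp [List.foldl, ih]

theorem pvPref_succ (m : Nat) :
    pvPref ((m : Int) + 1) = pvPref (m : Int) ++ PySem.Int.toStr ((m : Int) + 1) := by
  unfold pvPref
  rw [PySem.List.pyRange_one_succ_right (by omega : (1:Int) ≤ (m : Int) + 1)]
  simp

-- B's fold computes exactly the prefixes list (and the last prefix)
theorem pvBfold (m : Nat) :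
    (PySem.List.pyRange 1 ((m : Int)+1) 1).foldl
      (fun (acc : List String × String) i =>
        let s := acc.2 ++ PySem.Int.toStr i
        (acc.1 ++ [s], s)) ([], "")
    = ((PySem.List.pyRange 1 ((m : Int)+1) 1).map pvPref, pvPref (m : Int)) := by
  induction m with
  | zero =>
    rw [PySem.List.pyRange_one_eq_nil (by omega)]
    unfold pvPref
    simp
  | succ k ih =>
    rw [show ((k + 1 : Nat) : Int) = (k : Int) + 1 by omega]
    rw [PySem.List.pyRange_one_succ_right (by omega : (1:Int) ≤ (k : Int) + 1)]
    rw [List.foldl_append, ih, List.map_append]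
    simp [pvPref_succ k]

theorem num_des_asc_eq (n : Int) : num_des_asc n = num_des_asc_alt n := by
  unfold num_des_asc num_des_asc_alt
  rcases (by omega : n ≤ 0 ∨ 0 < n) with h | h
  · rw [PySem.List.pyRange_one_eq_nil (by omega : n + 1 ≤ 1),
        PySem.List.pyRange_neg_one_eq_nil (by omega : n ≤ 0)]
    simp
  · obtain ⟨m, rfl⟩ : ∃ m : Nat, n = (m : Int) := ⟨n.toNat, by omega⟩
    rw [pvBfold m, PySem.List.pyRange_neg_one_eq_reverse]
    simp only [pvFoldApp]
    unfold pvPref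
    simp [List.map_reverse]

-- ===== VERDICT (by name: the statement is the Claim_ definition above) =====
theorem num_des_asc_spec : Claim_equal_num_des_asc := by
  intro n _
  exact num_des_asc_eq n
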